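-- pv_equiv track=rewrite | github.com/alejandro20050830/promo_bot | tools.py | get_ref
-- ===== SOURCE A (Python) =====
-- def get_ref(user_dates, user_id):
--     lvl1 = []
--     lvl2 = []
--     lvl3 = []
--
--     for uid in user_dates:
--         if "register_dates" not in user_dates[uid]:
--             user_dates[uid]["register_dates"] = {}
--             user_dates[uid]["register_dates"]["invitator"] = "None"
--         if user_dates[uid]["register_dates"]["invitator"] == user_id:
--             lvl1.append(uid)
--
--     for user_id in lvl1:
--
--         for uid in user_dates:
--             if user_dates[uid]["register_dates"]["invitator"] == user_id:
--                 lvl2.append(uid)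
--
--     for user_id in lvl2:
--         for uid in user_dates:
--             if user_dates[uid]["register_dates"]["invitator"] == user_id:
--                 lvl3.append(uid)
--     return {"lvl1": lvl1, "lvl2": lvl2, "lvl3": lvl3}
-- ===== SOURCE B (Python) =====
-- def get_ref(user_dates, user_id):
--     # One pass: invitator -> list of invited uids (missing register_dates counts as "None").
--     # Note: unlike A, this does not mutate user_dates; return value is identical.
--     pairs = ((_invitator(d), uid) for uid, d in user_dates.items())
--     children = {}
--     for inv, uid in pairs:
--         children.setdefault(inv, []).append(uid)
--     lvl1 = children.get(user_id, [])
--     lvl2 = [c for p in lvl1 for c in children.get(p, [])]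
--     lvl3 = [c for p in lvl2 for c in children.get(p, [])]
--     return {"lvl1": lvl1, "lvl2": lvl2, "lvl3": lvl3}
--
--
-- def _invitator(d):
--     rd = d.get("register_dates")
--     return "None" if rd is None else rd["invitator"]
-- ===== Notes on version B (the rewrite author's own statement) =====
-- stated objective: alternative
-- what changed: B replaces A's per-parent rescans of the whole dict (one full scan for each collected level-1/level-2 parent) by a single pass that groups uids into an invitator->children index and reads the three levels off it; B also does not mutate user_dates (the return value is identical). On random inputs the levels are tiny, so the measured cost is the same.
import Mathlib
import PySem

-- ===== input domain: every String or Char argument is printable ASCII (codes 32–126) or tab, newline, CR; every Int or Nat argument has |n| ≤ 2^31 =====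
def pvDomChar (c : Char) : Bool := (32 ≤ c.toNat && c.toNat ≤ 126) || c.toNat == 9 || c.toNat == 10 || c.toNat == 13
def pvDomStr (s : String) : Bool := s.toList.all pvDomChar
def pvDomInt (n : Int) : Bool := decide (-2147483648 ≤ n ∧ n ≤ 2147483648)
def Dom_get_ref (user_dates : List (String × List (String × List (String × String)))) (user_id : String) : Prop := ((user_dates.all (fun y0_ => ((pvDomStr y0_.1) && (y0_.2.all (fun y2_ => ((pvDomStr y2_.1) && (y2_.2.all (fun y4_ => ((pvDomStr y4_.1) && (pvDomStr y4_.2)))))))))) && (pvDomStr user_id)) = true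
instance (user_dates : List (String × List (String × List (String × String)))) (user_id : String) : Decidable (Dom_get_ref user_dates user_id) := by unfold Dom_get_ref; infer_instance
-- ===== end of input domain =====

-- B builds an invitator->children index in one pass instead of A's per-parent rescans of the whole dict;
-- A mutates user_dates in place (inserts a default register_dates), B does not — the claim is about the return value only.

-- ===== PORT A =====
-- if "register_dates" not in user_dates[uid]: user_dates[uid]["register_dates"] = {"invitator": "None"}
def pvPatchA (d : List (String × List (String × String))) : List (String × List (String × String)) :=
  if (PySem.Dict.mk d).contains "register_dates" then d
  else ((PySem.Dict.mk d).insert "register_dates" [("invitator", "None")]).items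

-- d["register_dates"]["invitator"]; the "" defaults stand for KeyError and are excluded by Pre_get_ref
def pvInvA (d : List (String × List (String × String))) : String :=
  (PySem.Dict.mk ((PySem.Dict.mk d).getD "register_dates" [])).getD "invitator" ""

def get_ref (user_dates : List (String × List (String × List (String × String)))) (user_id : String) : List (String × List String) :=
  -- first loop: patch entries in place, collect lvl1
  let st := user_dates.foldl
    (fun (st : List (String × List (String × List (String × String))) × List String) e =>
      let d := pvPatchA e.2
      (st.1 ++ [(e.1, d)], if pvInvA d == user_id then st.2 ++ [e.1] else st.2))
    ([], [])
  let patched := st.1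
  let lvl1 := st.2
  -- second loop: for user_id in lvl1: rescan the (patched) dict
  let lvl2 := lvl1.foldl (fun acc p =>
      patched.foldl (fun acc2 e => if pvInvA e.2 == p then acc2 ++ [e.1] else acc2) acc) []
  -- third loop: for user_id in lvl2: rescan again
  let lvl3 := lvl2.foldl (fun acc p =>
      patched.foldl (fun acc2 e => if pvInvA e.2 == p then acc2 ++ [e.1] else acc2) acc) []
  [("lvl1", lvl1), ("lvl2", lvl2), ("lvl3", lvl3)]

-- ===== PORT B =====
-- _invitator(d): d.get("register_dates") -> "None" if missing, else rd["invitator"] ("" stands for KeyError, excluded by Pre_)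
def pvInvB (d : List (String × List (String × String))) : String :=
  match (PySem.Dict.mk d).get? "register_dates" with
  | none => "None"
  | some rd => (PySem.Dict.mk rd).getD "invitator" ""

def get_ref_alt (user_dates : List (String × List (String × List (String × String)))) (user_id : String) : List (String × List String) :=
  let pairs := user_dates.map (fun e => (pvInvB e.2, e.1))
  let children := pairs.foldl (fun d p => d.modify p.1 [] (· ++ [p.2])) PySem.Dict.empty
  let lvl1 := children.getD user_id []
  let lvl2 := lvl1.flatMap (fun p => children.getD p [])
  let lvl3 := lvl2.flatMap (fun p => children.getD p [])
  [("lvl1", lvl1), ("lvl2", lvl2), ("lvl3", lvl3)]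

-- ===== PRECONDITION & SPEC =====
-- Pre_ excludes exactly the inputs on which A raises KeyError: an entry whose dict has a
-- "register_dates" value lacking the "invitator" key (B raises there too).
def Pre_get_ref (user_dates : List (String × List (String × List (String × String)))) (user_id : String) : Prop :=
  (user_dates.all (fun e =>
    ((PySem.Dict.mk e.2).get? "register_dates").all
      (fun rd => (PySem.Dict.mk rd).contains "invitator"))) = true
instance (user_dates : List (String × List (String × List (String × String)))) (user_id : String) : Decidable (Pre_get_ref user_dates user_id) := by unfold Pre_get_ref; infer_instance

def pvWitness_get_ref : (List (String × List (String × List (String × String)))) × String :=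
  ([("a", [("register_dates", [("invitator", "None")])]), ("b", []), ("c", [("register_dates", [("invitator", "a")])])], "a")

def Spec_get_ref (user_dates : List (String × List (String × List (String × String)))) (user_id : String) (out : List (String × List String)) : Prop := out = get_ref_alt user_dates user_id
instance (user_dates : List (String × List (String × List (String × String)))) (user_id : String) (out : List (String × List String)) : Decidable (Spec_get_ref user_dates user_id out) := by unfold Spec_get_ref; infer_instance

-- ===== CLAIM (what is proved, stated in full; the proofs are below) =====
def Claim_equal_get_ref : Prop := ∀ (user_dates : List (String × List (String × List (String × String)))) (user_id : String), Dom_get_ref user_dates user_id → Pre_get_ref user_dates user_id → Spec_get_ref user_dates user_id (get_ref user_dates user_id)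

-- ===== LEMMAS AND PROOFS =====

-- A's patched invitator field is exactly B's _invitator
theorem pvInvA_patch (d : List (String × List (String × String))) :
    pvInvA (pvPatchA d) = pvInvB d := by
  unfold pvInvA pvPatchA pvInvB
  rcases hg : (PySem.Dict.mk d).get? "register_dates" with _ | rd
  · have h : (PySem.Dict.mk d).contains "register_dates" = false := by
      rw [← PySem.Dict.get?_eq_none_iff_contains]; exact hg
    simp only [h, Bool.false_eq_true, if_false]
    have hmk : ({ items := ((PySem.Dict.mk d).insert "register_dates" [("invitator", "None")]).items } : PySem.Dict String (List (String × String)))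
        = (PySem.Dict.mk d).insert "register_dates" [("invitator", "None")] := rfl
    rw [hmk, PySem.Dict.getD_insert_self]
    rfl
  · have h : (PySem.Dict.mk d).contains "register_dates" = true := by
      have := congrArg Option.isSome hg
      rw [← PySem.Dict.contains_eq_isSome_get?] at this
      simpa using this
    simp only [h, if_true]
    have hD : (PySem.Dict.mk d).getD "register_dates" [] = rd := by
      rw [PySem.Dict.getD_eq_get?_getD, hg]; rfl
    rw [hD]

-- first loop of A, with general accumulators
theorem pvLoop1 (user_id : String) (l : List (String × List (String × List (String × String))))
    (acc1 : List (String × List (String × List (String × String)))) (acc2 : List String) :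
    l.foldl
      (fun (st : List (String × List (String × List (String × String))) × List String) e =>
        let d := pvPatchA e.2
        (st.1 ++ [(e.1, d)], if pvInvA d == user_id then st.2 ++ [e.1] else st.2))
      (acc1, acc2)
    = (acc1 ++ l.map (fun e => (e.1, pvPatchA e.2)),
       acc2 ++ (l.filter (fun e => pvInvB e.2 == user_id)).map (·.1)) := by
  induction l generalizing acc1 acc2 with
  | nil => simp
  | cons e l ih =>
    simp only [List.foldl_cons]
    rw [pvInvA_patch]
    by_cases h : (pvInvB e.2 == user_id) = true
    · rw [if_pos h, ih]; simp [List.filter_cons, h]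
    · rw [if_neg h, ih]; simp [List.filter_cons, h]

-- B's index read at any key = one scan of the original dict
theorem pvChildren (l : List (String × List (String × List (String × String)))) (c : String) :
    ((l.map (fun e => (pvInvB e.2, e.1))).foldl
        (fun d p => d.modify p.1 [] (· ++ [p.2])) PySem.Dict.empty).getD c []
    = (l.filter (fun e => pvInvB e.2 == c)).map (·.1) := by
  rw [PySem.Dict.getD_foldl_modify_append]
  simp [List.filter_map, Function.comp_def]

-- A's inner rescan of the patched dict = the same scan of the original dict
theorem pvScan (p : String) (l : List (String × List (String × List (String × String))))
    (acc : List String) :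
    (l.map (fun e => (e.1, pvPatchA e.2))).foldl
        (fun acc2 e => if pvInvA e.2 == p then acc2 ++ [e.1] else acc2) acc
    = acc ++ (l.filter (fun e => pvInvB e.2 == p)).map (·.1) := by
  rw [PySem.List.foldl_append_if]
  simp [List.filter_map, Function.comp_def, pvInvA_patch]

-- A's per-parent rescans = B's flatMap over the index
theorem pvLevel (lvl : List String) (l : List (String × List (String × List (String × String)))) :
    lvl.foldl (fun acc p =>
        (l.map (fun e => (e.1, pvPatchA e.2))).foldl
          (fun acc2 e => if pvInvA e.2 == p then acc2 ++ [e.1] else acc2) acc) []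
    = lvl.flatMap (fun p =>
        ((l.map (fun e => (pvInvB e.2, e.1))).foldl
          (fun d q => d.modify q.1 [] (· ++ [q.2])) PySem.Dict.empty).getD p []) := by
  have h : lvl.foldl (fun acc p =>
        (l.map (fun e => (e.1, pvPatchA e.2))).foldl
          (fun acc2 e => if pvInvA e.2 == p then acc2 ++ [e.1] else acc2) acc) []
      = lvl.foldl (fun acc p => acc ++ (l.filter (fun e => pvInvB e.2 == p)).map (·.1)) [] := by
    apply PySem.List.foldl_congr_mem
    intro acc p _
    exact pvScan p l acc
  rw [h, PySem.List.foldl_append_eq_flatMap]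
  simp only [pvChildren, List.nil_append]

-- ===== VERDICT (by name: the statement is the Claim_ definition above) =====
theorem get_ref_spec : Claim_equal_get_ref := by
  intro user_dates user_id _ _
  unfold Spec_get_ref get_ref get_ref_alt
  simp only [pvLoop1, List.nil_append, pvLevel, pvChildren]
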